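-- pv_equiv track=rewrite | github.com/Vincent-devSG/AdventOfCode2023 | d9/d9.py | search_numbers2
-- ===== SOURCE A (Python) =====
-- def search_numbers2(numbers: list) -> list:
--
-- 	if len(numbers) == 1:
-- 		return numbers
--
-- 	line = numbers[-1]
-- 	above = numbers[-2]
--
-- 	if all(num == 0 for num in line):
-- 		line.insert(0, 0)
--
-- 	above.insert(0, above[0] - line[0])
-- 	numbers.pop(-1)
--
-- 	return search_numbers2(numbers)
-- ===== SOURCE B (Python) =====
-- def search_numbers2(numbers: list) -> list:
--     # Non-mutating right-to-left fold (return value equivalent; unlike A, does not mutate the input)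
--     if len(numbers) <= 1:
--         return numbers
--     acc = numbers[-1]
--     for above in reversed(numbers[:-1]):
--         if all(x == 0 for x in acc):
--             acc = [0] + acc
--         acc = [above[0] - acc[0]] + above
--     return [acc]
-- ===== Notes on version B (the rewrite author's own statement) =====
-- stated objective: alternative
-- what changed: Replaced A's outer-list recursion with in-place mutation (insert/pop on the argument) by a single non-mutating right-to-left fold with an accumulator list; return value only, B does not mutate its argument.
import Mathlib
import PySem

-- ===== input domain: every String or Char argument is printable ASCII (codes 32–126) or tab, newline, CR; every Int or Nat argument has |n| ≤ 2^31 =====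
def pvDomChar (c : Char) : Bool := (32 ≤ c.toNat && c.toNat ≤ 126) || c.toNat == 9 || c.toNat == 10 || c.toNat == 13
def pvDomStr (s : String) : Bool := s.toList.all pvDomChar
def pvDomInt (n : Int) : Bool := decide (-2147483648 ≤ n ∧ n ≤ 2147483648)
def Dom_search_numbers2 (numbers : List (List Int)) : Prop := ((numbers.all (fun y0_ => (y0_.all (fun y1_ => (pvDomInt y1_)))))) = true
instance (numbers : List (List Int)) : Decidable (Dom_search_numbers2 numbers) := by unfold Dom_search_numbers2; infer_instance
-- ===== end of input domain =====

-- B replaces A's mutating outer-list recursion by a non-mutating right-to-left fold; equivalence is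
-- about the RETURN value only (A mutates its argument in place, B does not).

-- ===== PORT A =====
-- A recurses on the outer list, peeling the last element each call.
def search_numbers2 (numbers : List (List Int)) : List (List Int) :=
  if numbers.length = 1 then numbers
  else if numbers.length < 1 then []   -- Python raises IndexError (numbers[-1]) here; excluded by Pre_
  else
    let line := numbers.getLastD []                  -- numbers[-1]
    let above := numbers.dropLast.getLastD []        -- numbers[-2]
    let line := if line.all (fun num => num == 0) then 0 :: line else line
    -- above[0] raises IndexError when above = []; excluded by Pre_, headD 0 there
    let above := (above.headD 0 - line.headD 0) :: above
    search_numbers2 (numbers.dropLast.dropLast ++ [above])   -- numbers.pop(-1), recurse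
termination_by numbers.length
decreasing_by simp [List.length_dropLast]; omega

-- ===== PORT B =====
-- B folds right-to-left over all but the last list, carrying an accumulator; no mutation.
def search_numbers2_alt (numbers : List (List Int)) : List (List Int) :=
  if numbers.length ≤ 1 then numbers
  else
    let acc := numbers.getLastD []
    let res := (numbers.dropLast.reverse).foldl
      (fun acc above =>
        let acc := if acc.all (fun x => x == 0) then 0 :: acc else acc
        (above.headD 0 - acc.headD 0) :: above) acc
    [res]

-- ===== PRECONDITION & SPEC =====
-- Pre_ excludes exactly the inputs where Python A raises IndexError: the empty outer list
-- (numbers[-1]) and inputs with an empty list before the last one (above[0]).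
def Pre_search_numbers2 (numbers : List (List Int)) : Prop :=
  numbers ≠ [] ∧ ∀ l ∈ numbers.dropLast, l ≠ []
instance (numbers : List (List Int)) : Decidable (Pre_search_numbers2 numbers) := by
  unfold Pre_search_numbers2; infer_instance
def pvWitness_search_numbers2 : List (List Int) := [[1, 3, 6], [2, 3], [1]]

def Spec_search_numbers2 (numbers : List (List Int)) (out : List (List Int)) : Prop := out = search_numbers2_alt numbers
instance (numbers : List (List Int)) (out : List (List Int)) : Decidable (Spec_search_numbers2 numbers out) := by unfold Spec_search_numbers2; infer_instance

-- ===== CLAIM (what is proved, stated in full; the proofs are below) =====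
def Claim_equal_search_numbers2 : Prop := ∀ (numbers : List (List Int)), Dom_search_numbers2 numbers → Pre_search_numbers2 numbers → Spec_search_numbers2 numbers (search_numbers2 numbers)

-- ===== LEMMAS AND PROOFS =====

-- the one step both programs perform: combine the line above with the current bottom line
def pvStep (above acc : List Int) : List Int :=
  let acc := if acc.all (fun x => x == 0) then 0 :: acc else acc
  (above.headD 0 - acc.headD 0) :: above

lemma searchA_concat (xs : List (List Int)) (a : List Int) :
    search_numbers2 (xs ++ [a]) = [xs.foldr pvStep a] := by
  induction xs using List.reverseRecOn generalizing a with
  | nil => simp [search_numbers2]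
  | append_singleton ys b ih =>
      rw [search_numbers2]
      have h1 : ((ys ++ [b]) ++ [a]).length = ys.length + 2 := by simp
      have h2 : ((ys ++ [b]) ++ [a]).dropLast = ys ++ [b] := by simp
      simp only [h1, h2]
      have : ¬ (ys.length + 2 = 1) := by omega
      simp only [this, if_false]
      have : ¬ (ys.length + 2 < 1) := by omega
      simp only [this, if_false]
      simp only [List.getLastD_concat, List.dropLast_concat]
      rw [ih]
      simp [List.foldr_append, pvStep]

lemma searchB_concat (xs : List (List Int)) (a : List Int) :
    search_numbers2_alt (xs ++ [a]) = [xs.foldr pvStep a] := by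
  rcases xs with _ | ⟨x, xs⟩
  · simp [search_numbers2_alt]
  · rw [search_numbers2_alt]
    have h1 : ¬ ((x :: xs) ++ [a]).length ≤ 1 := by simp
    simp only [h1, if_false, List.dropLast_concat, List.getLastD_concat]
    rw [List.foldl_reverse]
    rfl

-- ===== VERDICT (by name: the statement is the Claim_ definition above) =====
theorem search_numbers2_spec : Claim_equal_search_numbers2 := by
  intro numbers _ hpre
  unfold Spec_search_numbers2
  rcases List.eq_nil_or_concat numbers with rfl | ⟨xs, a, rfl⟩
  · exact absurd rfl hpre.1
  rw [List.concat_eq_append, searchA_concat, searchB_concat]
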